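-- pv_equiv track=rewrite | github.com/Snowwpanda/adventofcode | adventofcode24/22/22.py | new_secret_num
-- ===== SOURCE A (Python) =====
-- def new_secret_num(num, it):
--     for i in range(it):
--         new_num = num << 6
--         new_num = new_num ^ num
--         new_num = new_num % 16777216
--         new_num = new_num ^ (new_num >> 5)
--         new_num = new_num % 16777216
--         new_num = new_num ^ (new_num << 11)
--         new_num = new_num % 16777216
--         num = new_num
--
--     return num
-- ===== SOURCE B (Python) =====
-- def new_secret_num(num, it):
--     # One generator step is a linear map on GF(2)^24; compute its matrix M
--     # (as 24 column bitmasks), raise it to the it-th power by repeated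
--     # squaring, and apply M^it once to the 24-bit state.
--     if it <= 0:
--         return num
--
--     def step(x):
--         x = (x ^ (x << 6)) % 16777216
--         x = (x ^ (x >> 5)) % 16777216
--         x = (x ^ (x << 11)) % 16777216
--         return x
--
--     def apply_mat(m, x):
--         r = 0
--         for c in m:
--             if x & 1:
--                 r ^= c
--             x >>= 1
--         return r
--
--     def mat_mul(p, q):
--         return [apply_mat(p, c) for c in q]
--
--     m = [step(1 << i) for i in range(24)]      # columns of the step matrix
--     r = [1 << i for i in range(24)]            # identity matrix
--     e = it
--     while e:
--         if e & 1:
--             r = mat_mul(m, r)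
--         m = mat_mul(m, m)
--         e >>= 1
--     return apply_mat(r, num % 16777216)
-- ===== Notes on version B (the rewrite author's own statement) =====
-- stated objective: faster
-- what changed: A iterates the xorshift step it times; B builds the step's 24x24 GF(2) matrix as 24 column bitmasks and raises it to the it-th power by binary exponentiation, applying the result once to the 24-bit state.
import Mathlib
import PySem

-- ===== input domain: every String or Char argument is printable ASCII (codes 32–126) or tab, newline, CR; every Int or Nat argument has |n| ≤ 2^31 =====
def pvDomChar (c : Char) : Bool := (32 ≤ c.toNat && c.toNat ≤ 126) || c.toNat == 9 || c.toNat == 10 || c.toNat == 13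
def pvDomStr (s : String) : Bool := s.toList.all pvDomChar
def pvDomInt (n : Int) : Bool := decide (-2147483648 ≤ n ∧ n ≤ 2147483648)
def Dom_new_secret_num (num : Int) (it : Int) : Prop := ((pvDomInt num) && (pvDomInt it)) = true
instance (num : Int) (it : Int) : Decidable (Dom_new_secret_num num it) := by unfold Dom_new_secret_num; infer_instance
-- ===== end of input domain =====

-- B replaces the O(it) iteration of the xorshift step by binary exponentiation of its
-- 24×24 GF(2) matrix (24 column bitmasks), O(log it) matrix squarings; same return value.

-- ===== PORT A =====
-- one loop body of A: three xor/shift stages, each reduced mod 2^24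
def pvStepA (num : Int) : Int :=
  let n1 := num <<< (6 : Nat)
  let n2 := PySem.Int.bxor n1 num
  let n3 := PySem.Int.mod n2 16777216
  let n4 := PySem.Int.bxor n3 (n3 >>> (5 : Nat))
  let n5 := PySem.Int.mod n4 16777216
  let n6 := PySem.Int.bxor n5 (n5 <<< (11 : Nat))
  PySem.Int.mod n6 16777216

def new_secret_num (num : Int) (it : Int) : Int :=
  (PySem.List.pyRange 0 it 1).foldl (fun num _i => pvStepA num) num

-- ===== PORT B =====
-- Source B's step(x)
def pvStepB (x : Int) : Int :=
  let x1 := PySem.Int.mod (PySem.Int.bxor x (x <<< (6 : Nat))) 16777216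
  let x2 := PySem.Int.mod (PySem.Int.bxor x1 (x1 >>> (5 : Nat))) 16777216
  PySem.Int.mod (PySem.Int.bxor x2 (x2 <<< (11 : Nat))) 16777216

-- Source B's apply_mat loop: r, x are the loop state ('if x & 1' is Python truthiness: ≠ 0)
def pvApplyGo : List Int → Int → Int → Int
  | [], _x, r => r
  | c :: cs, x, r => pvApplyGo cs (x >>> (1 : Nat)) (if PySem.Int.band x 1 ≠ 0 then PySem.Int.bxor r c else r)

def pvApply (m : List Int) (x : Int) : Int := pvApplyGo m x 0

def pvMatMul (p q : List Int) : List Int := q.map (fun c => pvApply p c)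

-- Source B's while loop over e; e is the (positive) exponent, exactly it.toNat, so Nat;
-- 'e & 1' = e % 2, 'e >>= 1' = e / 2 (exact: e ≥ 0)
def pvPowLoop (e : Nat) (m r : List Int) : List Int :=
  if h : e = 0 then r
  else pvPowLoop (e / 2) (pvMatMul m m) (if e % 2 = 1 then pvMatMul m r else r)
  termination_by e
  decreasing_by exact Nat.div_lt_self (Nat.pos_of_ne_zero h) one_lt_two

def pvBase : List Int := (List.range 24).map (fun i => pvStepB ((1 : Int) <<< (i : Nat)))
def pvIdent : List Int := (List.range 24).map (fun i => ((1 : Int) <<< (i : Nat)))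

def new_secret_num_alt (num : Int) (it : Int) : Int :=
  if it ≤ 0 then num
  else pvApply (pvPowLoop it.toNat pvBase pvIdent) (PySem.Int.mod num 16777216)

-- ===== PRECONDITION & SPEC =====
def Spec_new_secret_num (num : Int) (it : Int) (out : Int) : Prop := out = new_secret_num_alt num it
instance (num : Int) (it : Int) (out : Int) : Decidable (Spec_new_secret_num num it out) := by unfold Spec_new_secret_num; infer_instance

-- ===== CLAIM (what is proved, stated in full; the proofs are below) =====
def Claim_equal_new_secret_num : Prop := ∀ (num : Int) (it : Int), Dom_new_secret_num num it → Spec_new_secret_num num it (new_secret_num num it)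

-- ===== LEMMAS AND PROOFS =====

-- Nat mirrors of the two programs' arithmetic (all states are < 2^24 there)
def nS1 (x : Nat) : Nat := (x ^^^ (x <<< 6)) % 16777216
def nS2 (x : Nat) : Nat := (x ^^^ (x >>> 5)) % 16777216
def nS3 (x : Nat) : Nat := (x ^^^ (x <<< 11)) % 16777216
def nStep (x : Nat) : Nat := nS3 (nS2 (nS1 x))

def nApplyGo : List Nat → Nat → Nat → Nat
  | [], _x, r => r
  | c :: cs, x, r => nApplyGo cs (x >>> 1) (if x % 2 = 1 then r ^^^ c else r)

def nApply (m : List Nat) (x : Nat) : Nat := nApplyGo m x 0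

def nMatMul (p q : List Nat) : List Nat := q.map (fun c => nApply p c)

def nPowLoop (e : Nat) (m r : List Nat) : List Nat :=
  if h : e = 0 then r
  else nPowLoop (e / 2) (nMatMul m m) (if e % 2 = 1 then nMatMul m r else r)
  termination_by e
  decreasing_by exact Nat.div_lt_self (Nat.pos_of_ne_zero h) one_lt_two

def nBase : List Nat := (List.range 24).map (fun i => nStep (2 ^ i))
def nIdent : List Nat := (List.range 24).map (fun i => (2 : Nat) ^ i)

-- ---- cast bridges: the Int ports compute the cast of the Nat mirrors ----

lemma cast_mod (n : Nat) : PySem.Int.mod (n : Int) 16777216 = ((n % 16777216 : Nat) : Int) := by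
  rw [PySem.Int.mod_eq_emod_of_pos (by norm_num)]
  push_cast
  rfl

lemma cast_applyGo (m : List Nat) (x r : Nat) :
    pvApplyGo (m.map (Nat.cast)) (x : Int) (r : Int) = ((nApplyGo m x r : Nat) : Int) := by
  induction m generalizing x r with
  | nil => simp [pvApplyGo, nApplyGo]
  | cons c cs ih =>
    have hband : PySem.Int.band (x : Int) 1 = ((x &&& 1 : Nat) : Int) := by
      exact_mod_cast PySem.Int.band_natCast x 1
    have hbx : PySem.Int.bxor (r : Int) (c : Int) = ((r ^^^ c : Nat) : Int) := by
      exact_mod_cast PySem.Int.bxor_natCast r c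
    simp only [List.map_cons, pvApplyGo, nApplyGo, hband, hbx, Nat.and_one_is_mod]
    rcases Nat.mod_two_eq_zero_or_one x with h | h <;>
      simp [h, ← Int.natCast_shiftRight, ih]

lemma cast_apply (m : List Nat) (x : Nat) :
    pvApply (m.map (Nat.cast)) (x : Int) = ((nApply m x : Nat) : Int) := by
  unfold pvApply nApply
  have := cast_applyGo m x 0
  simpa using this

lemma cast_matMul (p q : List Nat) :
    pvMatMul (p.map (Nat.cast)) (q.map (Nat.cast)) = (nMatMul p q).map (Nat.cast) := by
  unfold pvMatMul nMatMul
  rw [List.map_map, List.map_map]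
  exact List.map_congr_left fun c _ => cast_apply p c

lemma cast_powLoop (e : Nat) (m r : List Nat) :
    pvPowLoop e (m.map (Nat.cast)) (r.map (Nat.cast)) = (nPowLoop e m r).map (Nat.cast) := by
  induction e using Nat.strong_induction_on generalizing m r with
  | _ e ih =>
    unfold pvPowLoop nPowLoop
    by_cases h : e = 0
    · simp [h]
    · rw [dif_neg h, dif_neg h, cast_matMul]
      have hr : (if e % 2 = 1 then pvMatMul (m.map (Nat.cast)) (r.map (Nat.cast))
            else r.map (Nat.cast))
          = (if e % 2 = 1 then nMatMul m r else r).map (Nat.cast) := by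
        split <;> simp [cast_matMul]
      rw [hr]
      exact ih (e / 2) (Nat.div_lt_self (Nat.pos_of_ne_zero h) one_lt_two) _ _

lemma cast_stepB (x : Nat) : pvStepB (x : Int) = ((nStep x : Nat) : Int) := by
  have hb : ∀ (a b : Nat), PySem.Int.bxor (a : Int) (b : Int) = ((a ^^^ b : Nat) : Int) :=
    fun a b => by exact_mod_cast PySem.Int.bxor_natCast a b
  simp only [pvStepB, nStep, nS1, nS2, nS3, ← Int.natCast_shiftLeft, ← Int.natCast_shiftRight,
    hb, cast_mod]

lemma cast_base : pvBase = nBase.map (Nat.cast) := by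
  unfold pvBase nBase
  rw [List.map_map]
  refine List.map_congr_left fun i _ => ?_
  have h1 : ((1 : Int) <<< (i : Nat)) = (((1 <<< i : Nat)) : Int) := by
    exact_mod_cast (Int.natCast_shiftLeft 1 i).symm
  rw [h1, cast_stepB]
  simp [Nat.one_shiftLeft]

lemma cast_ident : pvIdent = nIdent.map (Nat.cast) := by
  unfold pvIdent nIdent
  rw [List.map_map]
  refine List.map_congr_left fun i _ => ?_
  have h1 : ((1 : Int) <<< (i : Nat)) = (((1 <<< i : Nat)) : Int) := by
    exact_mod_cast (Int.natCast_shiftLeft 1 i).symm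
  rw [h1]
  simp [Nat.one_shiftLeft]

-- ---- the Nat-level theory: nApply is the linear map with the given columns ----

lemma nApplyGo_acc (m : List Nat) (x r : Nat) : nApplyGo m x r = r ^^^ nApply m x := by
  induction m generalizing x r with
  | nil => simp [nApplyGo, nApply]
  | cons c cs ih =>
    unfold nApply
    simp only [nApplyGo]
    rw [ih, ih (x >>> 1) (if x % 2 = 1 then 0 ^^^ c else 0)]
    split_ifs <;> simp [Nat.xor_assoc]

lemma nApply_cons (c : Nat) (cs : List Nat) (x : Nat) :
    nApply (c :: cs) x = (if x % 2 = 1 then c else 0) ^^^ nApply cs (x >>> 1) := by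
  show nApplyGo cs (x >>> 1) (if x % 2 = 1 then 0 ^^^ c else 0) = _
  rw [nApplyGo_acc]
  split_ifs <;> simp

lemma nApply_zero (m : List Nat) : nApply m 0 = 0 := by
  induction m with
  | nil => rfl
  | cons c cs ih => simp [nApply_cons, ih]

lemma nApply_linear (m : List Nat) (x y : Nat) :
    nApply m (x ^^^ y) = nApply m x ^^^ nApply m y := by
  induction m generalizing x y with
  | nil => simp [nApply, nApplyGo]
  | cons c cs ih =>
    have hp : (x ^^^ y) % 2 = (x % 2) ^^^ (y % 2) := by
      rw [← Nat.and_one_is_mod, ← Nat.and_one_is_mod, ← Nat.and_one_is_mod,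
        Nat.and_xor_distrib_right]
    rw [nApply_cons, nApply_cons, nApply_cons, Nat.shiftRight_xor_distrib, ih, hp]
    rcases Nat.mod_two_eq_zero_or_one x with h1 | h1 <;>
      rcases Nat.mod_two_eq_zero_or_one y with h2 | h2 <;>
      simp [h1, h2, Nat.xor_comm, Nat.xor_left_comm]

lemma two_mul_xor_bit (a b : Nat) (hb : b < 2) : (2 * a) ^^^ b = 2 * a + b := by
  match b, hb with
  | 0, _ => simp
  | 1, _ =>
    apply Nat.eq_of_testBit_eq
    intro i
    have e1 : 2 * a + 1 = 2 ^ 1 * a + 1 := by ring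
    have e2 : 2 * a = a <<< 1 := by rw [Nat.shiftLeft_eq]; ring
    rw [Nat.testBit_xor, e1, Nat.testBit_two_pow_mul_add a (by norm_num : (1 : Nat) < 2 ^ 1) i,
      e2, Nat.testBit_shiftLeft]
    rcases Nat.eq_zero_or_pos i with hi | hi
    · subst hi; simp
    · have h1 : ¬ i < 1 := by omega
      have h2 : (1 : Nat) < 2 ^ i := Nat.one_lt_two_pow_iff.mpr (by omega)
      simp only [h1, if_false, Nat.testBit_eq_false_of_lt h2, Bool.xor_false, ge_iff_le]
      have h3 : 1 ≤ i := by omega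
      simp [h3]

lemma parity_decomp (x : Nat) : (x % 2) ^^^ (2 * (x >>> 1)) = x := by
  rw [Nat.shiftRight_one, Nat.xor_comm, two_mul_xor_bit _ _ (Nat.mod_lt x (by norm_num))]
  omega

-- the linear map with columns g(2^i), i < n, agrees with g on [0, 2^n)
lemma nApply_cols (n : Nat) (g : Nat → Nat) (hg : ∀ a b, g (a ^^^ b) = g a ^^^ g b)
    (hg0 : g 0 = 0) (x : Nat) (hx : x < 2 ^ n) :
    nApply ((List.range n).map (fun i => g (2 ^ i))) x = g x := by
  induction n generalizing g x with
  | zero =>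
    have hx0 : x = 0 := by omega
    subst hx0
    simp [nApply, nApplyGo, hg0]
  | succ n ih =>
    rw [List.range_succ_eq_map, List.map_cons, List.map_map, nApply_cons]
    have hcols : (List.range n).map ((fun i => g (2 ^ i)) ∘ Nat.succ)
        = (List.range n).map (fun i => (fun y => g (2 * y)) (2 ^ i)) := by
      refine List.map_congr_left fun i _ => ?_
      have : (2 : Nat) ^ (i + 1) = 2 * 2 ^ i := by ring
      simp [Function.comp, Nat.succ_eq_add_one, this]
    rw [hcols]
    have hg'lin : ∀ a b, (fun y => g (2 * y)) (a ^^^ b)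
        = (fun y => g (2 * y)) a ^^^ (fun y => g (2 * y)) b := by
      intro a b
      have h2 : 2 * (a ^^^ b) = (2 * a) ^^^ (2 * b) := by
        have := @Nat.shiftLeft_xor_distrib 1 a b
        simpa [Nat.shiftLeft_eq, mul_comm] using this
      simp only [h2, hg]
    have hg'0 : (fun y => g (2 * y)) 0 = 0 := by simpa using hg0
    have hxlt : x >>> 1 < 2 ^ n := by
      rw [Nat.shiftRight_one]
      have : (2 : Nat) ^ (n + 1) = 2 * 2 ^ n := by ring
      omega
    rw [ih (fun y => g (2 * y)) hg'lin hg'0 (x >>> 1) hxlt]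
    have hone : (if x % 2 = 1 then g (2 ^ 0) else 0) = g (x % 2) := by
      rcases Nat.mod_two_eq_zero_or_one x with h | h <;> simp [h, hg0]
    rw [hone]
    show g (x % 2) ^^^ g (2 * (x >>> 1)) = g x
    rw [← hg, parity_decomp]

lemma nApply_matMul (p q : List Nat) (x : Nat) :
    nApply (nMatMul p q) x = nApply p (nApply q x) := by
  induction q generalizing x with
  | nil => exact (nApply_zero p).symm
  | cons c cs ih =>
    show nApply (nApply p c :: nMatMul p cs) x = _
    rw [nApply_cons, nApply_cons, ih, nApply_linear]
    congr 1
    split_ifs <;> simp [nApply_zero]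

lemma nPowLoop_apply (e : Nat) (m r : List Nat) (x : Nat) :
    nApply (nPowLoop e m r) x = (fun y => nApply m y)^[e] (nApply r x) := by
  induction e using Nat.strong_induction_on generalizing m r with
  | _ e ih =>
    unfold nPowLoop
    by_cases h : e = 0
    · simp [h]
    · rw [dif_neg h, ih (e / 2) (Nat.div_lt_self (Nat.pos_of_ne_zero h) one_lt_two)]
      have hFF : (fun y => nApply (nMatMul m m) y) = (fun y => nApply m y)^[2] := by
        funext y
        simp [nApply_matMul, Function.iterate_succ_apply]
      have hit : ∀ y : Nat, (fun y => nApply (nMatMul m m) y)^[e / 2] y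
          = (fun y => nApply m y)^[2 * (e / 2)] y := by
        intro y
        rw [hFF, ← Function.iterate_mul]
      rcases Nat.mod_two_eq_zero_or_one e with hp | hp
      · rw [if_neg (by omega), hit]
        have he : 2 * (e / 2) = e := by omega
        rw [he]
      · rw [if_pos hp, hit]
        have : nApply (nMatMul m r) x = nApply m (nApply r x) := nApply_matMul m r x
        rw [this, ← Function.iterate_succ_apply]
        simp only [Nat.succ_eq_add_one]
        have he : 2 * (e / 2) + 1 = e := by omega
        rw [he]

-- ---- the step is linear, bounded, and nApply nBase computes it ----

lemma mask_xor (u v : Nat) : (u ^^^ v) % 16777216 = (u % 16777216) ^^^ (v % 16777216) := by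
  have h : (16777216 : Nat) = 2 ^ 24 := by norm_num
  rw [h]
  apply Nat.eq_of_testBit_eq
  intro i
  simp only [Nat.testBit_mod_two_pow, Nat.testBit_xor]
  by_cases h24 : i < 24 <;> simp [h24]

lemma nS1_linear (u v : Nat) : nS1 (u ^^^ v) = nS1 u ^^^ nS1 v := by
  unfold nS1
  rw [← mask_xor]
  congr 1
  rw [Nat.shiftLeft_xor_distrib]
  simp [Nat.xor_assoc, Nat.xor_comm, Nat.xor_left_comm]

lemma nS2_linear (u v : Nat) : nS2 (u ^^^ v) = nS2 u ^^^ nS2 v := by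
  unfold nS2
  rw [← mask_xor]
  congr 1
  rw [Nat.shiftRight_xor_distrib]
  simp [Nat.xor_assoc, Nat.xor_comm, Nat.xor_left_comm]

lemma nS3_linear (u v : Nat) : nS3 (u ^^^ v) = nS3 u ^^^ nS3 v := by
  unfold nS3
  rw [← mask_xor]
  congr 1
  rw [Nat.shiftLeft_xor_distrib]
  simp [Nat.xor_assoc, Nat.xor_comm, Nat.xor_left_comm]

lemma nStep_linear (a b : Nat) : nStep (a ^^^ b) = nStep a ^^^ nStep b := by
  unfold nStep
  rw [nS1_linear, nS2_linear, nS3_linear]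

lemma nStep_lt (x : Nat) : nStep x < 16777216 := by
  unfold nStep nS3
  exact Nat.mod_lt _ (by norm_num)

lemma nApply_base (x : Nat) (hx : x < 16777216) : nApply nBase x = nStep x := by
  exact nApply_cols 24 nStep nStep_linear (by decide) x (by norm_num at hx ⊢; omega)

lemma nApply_ident (x : Nat) (hx : x < 16777216) : nApply nIdent x = x := by
  have := nApply_cols 24 id (fun a b => rfl) rfl x (by norm_num at hx ⊢; omega)
  simpa [nIdent] using this

-- ---- A's step equals nStep of the low 24 bits, for every Int ----

lemma stage1_mod (n : Nat) :
    ((n <<< 6) ^^^ n) % 16777216 = ((n % 16777216) ^^^ ((n % 16777216) <<< 6)) % 16777216 := by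
  have h : (16777216 : Nat) = 2 ^ 24 := by norm_num
  rw [h]
  apply Nat.eq_of_testBit_eq
  intro i
  simp only [Nat.testBit_mod_two_pow, Nat.testBit_xor, Nat.testBit_shiftLeft, ge_iff_le]
  by_cases h24 : i < 24
  · have h246 : i - 6 < 24 := by omega
    by_cases h6 : 6 ≤ i <;>
      cases hni : n.testBit i <;> cases hni6 : n.testBit (i - 6) <;>
        simp [h24, h246, h6]
  · simp [h24]

lemma stage1_neg (d : Nat) :
    ((2 ^ 6 * d + 63) ^^^ d) % 16777216
      = ((16777216 - (d % 16777216 + 1)) ^^^ ((16777216 - (d % 16777216 + 1)) <<< 6)) % 16777216 := by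
  have h : (16777216 : Nat) = 2 ^ 24 := by norm_num
  rw [h]
  have hs : d % 2 ^ 24 < 2 ^ 24 := Nat.mod_lt d (by norm_num)
  have hsub := Nat.testBit_two_pow_sub_succ hs
  apply Nat.eq_of_testBit_eq
  intro i
  simp only [Nat.testBit_mod_two_pow, Nat.testBit_xor, Nat.testBit_shiftLeft,
    Nat.testBit_two_pow_mul_add d (by norm_num : (63 : Nat) < 2 ^ 6) i, hsub, ge_iff_le]
  by_cases h24 : i < 24
  · have h246 : i - 6 < 24 := by omega
    by_cases h6 : i < 6
    · have h63 : (63 : Nat).testBit i = true := by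
        interval_cases i <;> rfl
      have h66 : ¬ 6 ≤ i := by omega
      simp [h24, h246, h6, h63, h66]
    · have h66 : 6 ≤ i := by omega
      cases hdi : d.testBit i <;> cases hdi6 : d.testBit (i - 6) <;>
        simp [h24, h246, h6, h66]
  · simp [h24]

lemma bxor_neg_step (num : Int) (h : num < 0) :
    PySem.Int.bxor (num <<< (6 : Nat)) num = (((2 ^ 6 * (-num - 1).toNat + 63) ^^^ (-num - 1).toNat : Nat) : Int) := by
  have h64 : num <<< (6 : Nat) = num * 64 := by
    rw [Int.shiftLeft_eq]
    norm_num
  unfold PySem.Int.bxor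
  rw [h64]
  rw [if_neg (by omega : ¬ (0 : Int) ≤ num * 64), if_neg (by omega : ¬ (0 : Int) ≤ num)]
  congr 1
  have h1 : (-(num * 64) - 1).toNat = 2 ^ 6 * (-num - 1).toNat + 63 := by omega
  rw [h1]

lemma pvStepA_eq (num : Int) : pvStepA num = ((nStep (num % 16777216).toNat : Nat) : Int) := by
  have hbx : ∀ a b : Nat, PySem.Int.bxor (a : Int) (b : Int) = ((a ^^^ b : Nat) : Int) :=
    fun a b => by exact_mod_cast PySem.Int.bxor_natCast a b
  have hS1 : PySem.Int.mod (PySem.Int.bxor (num <<< (6 : Nat)) num) 16777216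
      = ((((num % 16777216).toNat ^^^ ((num % 16777216).toNat <<< 6)) % 16777216 : Nat) : Int) := by
    rcases (show num < 0 ∨ 0 ≤ num by omega) with hneg | hnn
    case inr =>
      obtain ⟨n, rfl⟩ : ∃ n : Nat, num = ((n : Nat) : Int) := ⟨num.toNat, by omega⟩
      rw [← Int.natCast_shiftLeft, hbx, cast_mod]
      have hr0n : (((n : Nat) : Int) % 16777216).toNat = n % 16777216 := by omega
      rw [hr0n]
      exact congrArg _ (stage1_mod n)
    case inl =>
      rw [bxor_neg_step num hneg, cast_mod]
      have hr0d : (num % 16777216).toNat = 16777216 - ((-num - 1).toNat % 16777216 + 1) := by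
        omega
      rw [hr0d]
      exact congrArg _ (stage1_neg ((-num - 1).toNat))
  simp only [pvStepA, nStep, nS1, nS2, nS3]
  rw [hS1]
  simp only [← Int.natCast_shiftLeft, ← Int.natCast_shiftRight, hbx, cast_mod]

-- ---- assembling the two sides ----

lemma foldl_const_iterate {α β : Type} (l : List α) (f : β → β) (x : β) :
    l.foldl (fun n _ => f n) x = f^[l.length] x := by
  induction l generalizing x with
  | nil => rfl
  | cons a t ih =>
    show t.foldl (fun n _ => f n) (f x) = f^[t.length + 1] x
    rw [ih, ← Function.iterate_succ_apply]

lemma iterA (k : Nat) (y : Nat) (hy : y < 16777216) :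
    pvStepA^[k] (y : Int) = ((nStep^[k] y : Nat) : Int) := by
  induction k generalizing y with
  | zero => simp
  | succ k ih =>
    rw [Function.iterate_succ_apply, Function.iterate_succ_apply]
    have h1 : pvStepA ((y : Nat) : Int) = ((nStep y : Nat) : Int) := by
      have hy' : (((y : Nat) : Int) % 16777216).toNat = y := by omega
      rw [pvStepA_eq, hy']
    rw [h1]
    exact ih (nStep y) (nStep_lt y)

lemma iterB (k : Nat) (y : Nat) (hy : y < 16777216) :
    (fun z => nApply nBase z)^[k] y = nStep^[k] y ∧ nStep^[k] y < 16777216 := by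
  induction k generalizing y with
  | zero => exact ⟨rfl, hy⟩
  | succ k ih =>
    rw [Function.iterate_succ_apply, Function.iterate_succ_apply]
    have hb : nApply nBase y = nStep y := nApply_base y hy
    rw [hb]
    exact ih (nStep y) (nStep_lt y)

-- ===== VERDICT (by name: the statement is the Claim_ definition above) =====
theorem new_secret_num_spec : Claim_equal_new_secret_num := by
  intro num it _hdom
  unfold Spec_new_secret_num new_secret_num new_secret_num_alt
  by_cases hit : it ≤ 0
  · rw [if_pos hit]
    have hempty : PySem.List.pyRange 0 it 1 = [] := by
      simp [PySem.List.pyRange]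
      omega
    rw [hempty]
    rfl
  · rw [if_neg hit]
    have hApy : PySem.List.pyRange 0 it 1 = (List.range it.toNat).map (fun k => ((k : Nat) : Int)) := by
      rw [show it = ((it.toNat : Nat) : Int) by omega]
      exact PySem.List.pyRange_zero_natCast it.toNat
    rw [hApy, foldl_const_iterate]
    simp only [List.length_map, List.length_range]
    have hr0lt : (num % 16777216).toNat < 16777216 := by omega
    obtain ⟨e', he'⟩ : ∃ e', it.toNat = e' + 1 := ⟨it.toNat - 1, by omega⟩
    have hA : pvStepA^[it.toNat] num = ((nStep^[it.toNat] (num % 16777216).toNat : Nat) : Int) := by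
      rw [he', Function.iterate_succ_apply, pvStepA_eq num,
        iterA e' (nStep (num % 16777216).toNat) (nStep_lt _),
        ← Function.iterate_succ_apply]
    have hmod : PySem.Int.mod num 16777216 = (((num % 16777216).toNat : Nat) : Int) := by
      rw [PySem.Int.mod_eq_emod_of_pos (by norm_num)]
      omega
    rw [hA, hmod, cast_base, cast_ident, cast_powLoop, cast_apply, nPowLoop_apply,
      nApply_ident _ hr0lt, (iterB it.toNat _ hr0lt).1]
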